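-- pv_equiv track=rewrite | github.com/NCATS-Tangerine/biothings-explorer-beacon | client/beacon_controller/mychem_client.py | get_best_key
-- ===== SOURCE A (Python) =====
-- def get_best_key(substring:str, d:dict):
--     optimal = []
--     size = float('inf')
--     for k, v in d.items():
--         keys = k.split('.')
--         if (substring == keys[-1] or '_{}'.format(substring) in keys[-1]) and isinstance(v, str):
--             if len(keys) < size:
--                 optimal = [k]
--                 size = len(keys)
--             elif len(keys) == size:
--                 optimal.append(k)
--                 size = len(keys)
--
--     size = float('inf')
--     best_key = None
--     for k in optimal:
--         if len(k) < size:
--             best_key = k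
--             size = len(k)
--
--     return best_key
-- ===== SOURCE B (Python) =====
-- def get_best_key(substring, d):
--     matches = [k for k, v in d.items()
--                if (substring == k.split('.')[-1]
--                    or '_{}'.format(substring) in k.split('.')[-1])
--                and isinstance(v, str)]
--     ordered = sorted(matches, key=lambda k: (len(k.split('.')), len(k)))
--     return ordered[0] if ordered else None
-- ===== Notes on version B (the rewrite author's own statement) =====
-- stated objective: alternative
-- what changed: A's two min-tracking accumulator loops (collect keys with minimal split-count, then scan for the shortest) are replaced by filter + stable sort of the matching keys under the tuple key (number of '.'-parts, key length) and taking the first element of the sorted list; stability of Python's sort preserves A's first-wins tie-breaking.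
import Mathlib
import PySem

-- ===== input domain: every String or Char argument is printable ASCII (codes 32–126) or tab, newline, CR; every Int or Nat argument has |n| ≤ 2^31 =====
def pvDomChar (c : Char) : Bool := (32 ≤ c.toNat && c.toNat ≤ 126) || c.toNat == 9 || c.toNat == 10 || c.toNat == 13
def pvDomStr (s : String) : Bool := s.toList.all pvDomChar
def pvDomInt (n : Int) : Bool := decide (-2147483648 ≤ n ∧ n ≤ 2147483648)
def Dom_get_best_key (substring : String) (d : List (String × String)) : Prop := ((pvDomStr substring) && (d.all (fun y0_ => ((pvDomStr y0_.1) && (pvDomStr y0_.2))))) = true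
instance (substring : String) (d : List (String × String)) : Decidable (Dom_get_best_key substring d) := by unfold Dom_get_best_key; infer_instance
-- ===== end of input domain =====

-- B replaces A's two min-tracking accumulator passes by filter + stable sort of the matching
-- keys under the tuple key (number of '.'-parts, key length) and taking the sorted list's head;
-- objective: alternative (stable sort preserves A's first-wins tie-breaking).


-- ===== PORT A =====
-- Helpers shared by both ports (the membership test is TEXTUALLY IDENTICAL in both Pythons):
-- k.split('.')  — sep "." ≠ "", so `split?` is always `some`, and the result is never [],
-- so `pyGet? … (-1)` (= keys[-1]) is always `some`; the `.getD` defaults are never taken.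
def pvKeys (k : String) : List String := (PySem.Str.split? k ".").getD []
def pvLast (k : String) : String := (PySem.List.pyGet? (pvKeys k) (-1)).getD ""
-- substring == keys[-1] or '_{}'.format(substring) in keys[-1]
-- (`isinstance(v, str)` is always true at type dict[str, str] and is dropped in both ports)
def pvMatch (substring k : String) : Bool :=
  substring == pvLast k || PySem.Str.isIn ("_" ++ substring) (pvLast k)

-- float('inf') is modelled as `none : Option _` (none = +inf), each loop body as a step function.
def pvStep1 (substring : String) (st : List String × Option Nat) (kv : String × String) :
    List String × Option Nat :=
  if pvMatch substring kv.1 then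
    match st.2 with
    | none => ([kv.1], some (pvKeys kv.1).length)
    | some size =>
      if (pvKeys kv.1).length < size then ([kv.1], some (pvKeys kv.1).length)
      else if (pvKeys kv.1).length == size then (st.1 ++ [kv.1], some (pvKeys kv.1).length)
      else st
  else st

def pvStep2 (st : Option String × Option Int) (k : String) : Option String × Option Int :=
  match st.2 with
  | none => (some k, some (PySem.Str.len k))
  | some size =>
    if PySem.Str.len k < size then (some k, some (PySem.Str.len k)) else st

def get_best_key (substring : String) (d : List (String × String)) : Option String :=
  (((d.foldl (pvStep1 substring) ([], none)).1).foldl pvStep2 (none, none)).1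

-- ===== PORT B =====
-- matches = [k for k, v in d.items() if …]; ordered = sorted(matches, key=…); ordered[0] if ordered else None
def get_best_key_alt (substring : String) (d : List (String × String)) : Option String :=
  (PySem.List.sorted2
    ((d.filter (fun kv => pvMatch substring kv.1)).map (·.1))
    (fun k => (pvKeys k).length) (fun k => PySem.Str.len k)).head?

-- ===== PRECONDITION & SPEC =====
def Spec_get_best_key (substring : String) (d : List (String × String)) (out : Option String) : Prop := out = get_best_key_alt substring d
instance (substring : String) (d : List (String × String)) (out : Option String) : Decidable (Spec_get_best_key substring d out) := by unfold Spec_get_best_key; infer_instance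

-- ===== CLAIM (what is proved, stated in full; the proofs are below) =====
def Claim_equal_get_best_key : Prop := ∀ (substring : String) (d : List (String × String)), Dom_get_best_key substring d → Spec_get_best_key substring d (get_best_key substring d)

-- ===== LEMMAS AND PROOFS =====

-- A's loop body on the already-filtered key list (the `if pvMatch` stripped off).
def pvS1 (st : List String × Option Nat) (k : String) : List String × Option Nat :=
  match st.2 with
  | none => ([k], some (pvKeys k).length)
  | some size =>
    if (pvKeys k).length < size then ([k], some (pvKeys k).length)
    else if (pvKeys k).length == size then (st.1 ++ [k], some (pvKeys k).length)
    else st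

-- The strict lexicographic comparison `sorted2` uses at our two keys.
def pvLt (a b : String) : Bool :=
  decide ((pvKeys a).length < (pvKeys b).length) ||
  !decide ((pvKeys b).length < (pvKeys a).length) &&
  decide (PySem.Str.len a < PySem.Str.len b)

-- Running first-wins minimum under pvLt.
def pvCombine (acc : Option String) (x : String) : Option String :=
  match acc with
  | none => some x
  | some m => if pvLt x m then some x else some m

theorem pv_head_insertBy (x : String) (acc : List String) :
    (PySem.List.insertBy pvLt x acc).head? = pvCombine acc.head? x := by
  cases acc with
  | nil => rfl
  | cons h t =>
    simp only [PySem.List.insertBy, pvCombine, List.head?_cons]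
    split_ifs with h1 <;> rfl

theorem pv_head_foldl (l : List String) (acc : List String) :
    (l.foldl (fun a x => PySem.List.insertBy pvLt x a) acc).head? =
      l.foldl pvCombine acc.head? := by
  induction l generalizing acc with
  | nil => rfl
  | cons x t ih => simp only [List.foldl_cons]; rw [ih, pv_head_insertBy]

theorem pv_alt_eq_foldl (substring : String) (d : List (String × String)) :
    get_best_key_alt substring d =
      ((d.filter (fun kv => pvMatch substring kv.1)).map (·.1)).foldl pvCombine none := by
  show (((d.filter (fun kv => pvMatch substring kv.1)).map (·.1)).foldl
          (fun a x => PySem.List.insertBy pvLt x a) []).head? = _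
  rw [pv_head_foldl]
  rfl

theorem pv_a_fold_eq (substring : String) (d : List (String × String))
    (init : List String × Option Nat) :
    d.foldl (pvStep1 substring) init =
      ((d.filter (fun kv => pvMatch substring kv.1)).map (·.1)).foldl pvS1 init := by
  rw [List.foldl_map, List.foldl_filter]
  rfl

theorem pv_len_lt (k b : String) (hln : PySem.Str.len k < PySem.Str.len b) :
    k.length < b.length := by
  simp only [PySem.Str.len_eq, String.length_toList] at hln
  exact_mod_cast hln

theorem pv_len_ge (k b : String) (hln : ¬ PySem.Str.len k < PySem.Str.len b) :
    ¬ k.length < b.length := by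
  intro hc
  apply hln
  simp only [PySem.Str.len_eq, String.length_toList]
  exact_mod_cast hc

theorem pvCombine_sc_lt (b k : String) (hlt : (pvKeys k).length < (pvKeys b).length) :
    pvCombine (some b) k = some k := by
  simp only [pvCombine, pvLt]; rw [if_pos]; simp [hlt]

theorem pvCombine_sc_eq_len_lt (b k : String) (hsc : (pvKeys k).length = (pvKeys b).length)
    (hln : PySem.Str.len k < PySem.Str.len b) : pvCombine (some b) k = some k := by
  simp only [pvCombine, pvLt]; rw [if_pos]; simp [hsc, pv_len_lt k b hln]

theorem pvCombine_sc_eq_len_ge (b k : String) (hsc : (pvKeys k).length = (pvKeys b).length)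
    (hln : ¬ PySem.Str.len k < PySem.Str.len b) : pvCombine (some b) k = some b := by
  simp only [pvCombine, pvLt]; rw [if_neg]; simp [hsc, pv_len_ge k b hln]

theorem pvCombine_sc_gt (b k : String) (h1 : ¬ (pvKeys k).length < (pvKeys b).length)
    (h2 : (pvKeys b).length < (pvKeys k).length) : pvCombine (some b) k = some b := by
  simp only [pvCombine, pvLt]; rw [if_neg]; simp [h1, h2]

theorem pv_main : ∀ (cs opt : List String) (b : String) (s : Nat),
    (∀ k ∈ opt, (pvKeys k).length = s) → b ∈ opt →
    opt.foldl pvStep2 (none, none) = (some b, some (PySem.Str.len b)) →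
    ((cs.foldl pvS1 (opt, some s)).1.foldl pvStep2 (none, none)).1 =
      cs.foldl pvCombine (some b) := by
  intro cs
  induction cs with
  | nil =>
    intro opt b s _ _ hsp
    simpa using congrArg Prod.fst hsp
  | cons k t ih =>
    intro opt b s hall hb hsp
    have hbs : (pvKeys b).length = s := hall b hb
    simp only [List.foldl_cons, pvS1]
    by_cases hlt : (pvKeys k).length < s
    · rw [if_pos hlt]
      have h1 : [k].foldl pvStep2 (none, none) = (some k, some (PySem.Str.len k)) := rfl
      rw [ih [k] k (pvKeys k).length (by simp) (by simp) h1,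
          pvCombine_sc_lt b k (by omega)]
    · rw [if_neg hlt]
      by_cases heq : (pvKeys k).length = s
      · rw [if_pos (show ((pvKeys k).length == s) = true by simp [heq]), heq]
        have hspk : (opt ++ [k]).foldl pvStep2 (none, none) =
            pvStep2 (some b, some (PySem.Str.len b)) k := by
          rw [List.foldl_append, hsp]; rfl
        have hallk : ∀ k' ∈ opt ++ [k], (pvKeys k').length = s := by
          intro k' hk'
          rcases List.mem_append.1 hk' with h | h
          · exact hall k' h
          · simp at h; subst h; exact heq
        have hsc : (pvKeys k).length = (pvKeys b).length := by omega
        by_cases hln : PySem.Str.len k < PySem.Str.len b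
        · have hsp2 : (opt ++ [k]).foldl pvStep2 (none, none) =
              (some k, some (PySem.Str.len k)) := by
            rw [hspk]; simp [pvStep2, pv_len_lt k b hln]
          rw [ih (opt ++ [k]) k s hallk (by simp) hsp2,
              pvCombine_sc_eq_len_lt b k hsc hln]
        · have hsp2 : (opt ++ [k]).foldl pvStep2 (none, none) =
              (some b, some (PySem.Str.len b)) := by
            rw [hspk]; simp [pvStep2, pv_len_ge k b hln]
          rw [ih (opt ++ [k]) b s hallk (List.mem_append_left _ hb) hsp2,
              pvCombine_sc_eq_len_ge b k hsc hln]
      · rw [if_neg (show ¬ ((pvKeys k).length == s) = true by simp [heq])]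
        rw [ih opt b s hall hb hsp,
            pvCombine_sc_gt b k (by omega) (by omega)]

-- ===== VERDICT (by name: the statement is the Claim_ definition above) =====
theorem get_best_key_spec : Claim_equal_get_best_key := by
  intro substring d _
  unfold Spec_get_best_key
  rw [pv_alt_eq_foldl, get_best_key, pv_a_fold_eq]
  cases h : (d.filter (fun kv => pvMatch substring kv.1)).map (·.1) with
  | nil => rfl
  | cons x t =>
    simp only [List.foldl_cons]
    have hx : pvS1 ([], none) x = ([x], some (pvKeys x).length) := rfl
    have hc : pvCombine none x = some x := rfl
    rw [hx, hc]
    exact pv_main t [x] x (pvKeys x).length (by simp) (by simp) rfl
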